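-- pv_equiv track=rewrite | github.com/pm4py/pm4py-core | pm4py/algo/discovery/inductive/variants/im_clean/utils.py | msd
-- ===== SOURCE A (Python) =====
-- import itertools
--
-- def get_alphabet(cl):
--     return set(itertools.chain(*cl))
--
-- def msd(cl):
--     msd = dict()
--     alphabet = get_alphabet(cl)
--     for a in alphabet:
--         if len(list(filter(lambda t: len(t) > 1, list(map(lambda t: list(filter(lambda e: e == a, t)), cl))))) > 0:
--             activity_indices = list(
--                 filter(lambda t: len(t) > 1, list(map(lambda t: [i for i, x in enumerate(t) if x == a], cl))))
--             msd[a] = min([i for l in list(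
--                 map(lambda t: [t[i] - t[i - 1] - 1 for i, x in enumerate(t) if i > 0], activity_indices)) for i in l])
--     return msd
-- ===== SOURCE B (Python) =====
-- def msd(cl):
--     mins = {}
--     for t in cl:
--         last = {}
--         for i, x in enumerate(t):
--             if x in last:
--                 g = i - last[x] - 1
--                 if x not in mins or g < mins[x]:
--                     mins[x] = g
--             last[x] = i
--     order = dict.fromkeys(x for t in cl for x in t)  # alphabet, first-occurrence order
--     return {a: mins[a] for a in order if a in mins}
-- ===== Notes on version B (the rewrite author's own statement) =====
-- stated objective: faster
-- what changed: A scans the whole log once per alphabet symbol, rebuilding per-activity index lists and gap lists before taking a global min; B makes a single pass over the traces keeping each activity's last index and a running minimum gap in dictionaries.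
import Mathlib
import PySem

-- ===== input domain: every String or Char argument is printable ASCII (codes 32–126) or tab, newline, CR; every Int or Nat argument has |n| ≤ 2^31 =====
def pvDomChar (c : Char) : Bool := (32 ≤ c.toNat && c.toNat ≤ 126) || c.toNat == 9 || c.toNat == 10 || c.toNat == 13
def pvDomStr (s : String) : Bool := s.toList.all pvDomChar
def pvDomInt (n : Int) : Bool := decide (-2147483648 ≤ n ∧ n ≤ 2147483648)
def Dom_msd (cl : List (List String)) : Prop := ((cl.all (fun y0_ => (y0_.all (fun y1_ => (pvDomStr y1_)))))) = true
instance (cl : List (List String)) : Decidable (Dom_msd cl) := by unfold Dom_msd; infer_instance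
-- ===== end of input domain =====

-- B replaces A's per-activity re-scans of all traces by one pass over the traces keeping
-- the last index of each activity and a running minimum gap (objective: faster, asymptotic).

-- ===== PORT A =====
def get_alphabet (cl : List (List String)) : PySem.Set String :=
  PySem.Set.ofList (cl.flatMap (fun t => t))   -- set(itertools.chain(*cl))

-- body of A's 'for a in alphabet' loop (dict comparison ignores order, so the Set's
-- first-occurrence order stands in for Python's unspecified set iteration order)
def astep (cl : List (List String)) (m : PySem.Dict String Int) (a : String) :
    PySem.Dict String Int :=
  if ((cl.map (fun t => t.filter (fun e => e == a))).filter
        (fun t => decide (t.length > 1))).length > 0 then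
    let activity_indices :=
      (cl.map (fun t => (PySem.List.enumerate t).filterMap
        (fun p => if p.2 == a then some p.1 else none))).filter
        (fun t => decide (t.length > 1))
    let gaps :=
      (activity_indices.map (fun t => (PySem.List.enumerate t).filterMap
        (fun p => if p.1 > 0 then
            some (PySem.List.pyGetD t p.1 0 - PySem.List.pyGetD t (p.1 - 1) 0 - 1)
          else none))).flatMap (fun l => l)
    -- Python's min(...) of a list that the branch guard guarantees nonempty; .getD 0 is unreachable
    m.insert a ((PySem.List.min? gaps (fun x => x)).getD 0)
  else m

def msd (cl : List (List String)) : List (String × Int) :=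
  ((get_alphabet cl).foldl (astep cl) PySem.Dict.empty).items

-- ===== PORT B =====
-- body of B's inner 'for i, x in enumerate(t)' loop; state = (mins, last)
def bstep (q : PySem.Dict String Int × PySem.Dict String Int) (ix : Int × String) :
    PySem.Dict String Int × PySem.Dict String Int :=
  let mins := q.1
  let last := q.2
  let i := ix.1
  let x := ix.2
  let mins' :=
    if last.contains x then
      let g := i - last.getD x 0 - 1   -- guard ensures x in last, so getD's default is unreachable
      if !(mins.contains x) || g < mins.getD x 0 then mins.insert x g else mins
    else mins
  (mins', last.insert x i)

-- body of B's outer 'for t in cl' loop: fresh 'last' per trace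
def bouter (mins : PySem.Dict String Int) (t : List String) : PySem.Dict String Int :=
  ((PySem.List.enumerate t).foldl bstep (mins, PySem.Dict.empty)).1

def msd_alt (cl : List (List String)) : List (String × Int) :=
  let mins := cl.foldl bouter PySem.Dict.empty
  (PySem.List.dedup (cl.flatMap (fun t => t))).filterMap
    (fun a => (mins.get? a).map (fun g => (a, g)))

-- ===== PRECONDITION & SPEC =====
def Spec_msd (cl : List (List String)) (out : List (String × Int)) : Prop := out = msd_alt cl
instance (cl : List (List String)) (out : List (String × Int)) : Decidable (Spec_msd cl out) := by unfold Spec_msd; infer_instance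

-- ===== CLAIM (what is proved, stated in full; the proofs are below) =====
def Claim_equal_msd : Prop := ∀ (cl : List (List String)), Dom_msd cl → Spec_msd cl (msd cl)

-- ===== LEMMAS AND PROOFS =====

-- occurrence indices of activity a in u, numbering from s (A's 'activity indices' list)
def occ (a : String) (s : Int) (u : List String) : List Int :=
  (PySem.List.enumerate u s).filterMap (fun p => if p.2 == a then some p.1 else none)

-- gaps between consecutive entries of an index list
def zipDiffs : List Int → List Int
  | x :: y :: r => (y - x - 1) :: zipDiffs (y :: r)
  | _ => []

-- one running-minimum update (B's 'if x not in mins or g < mins[x]')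
def upd (o : Option Int) (g : Int) : Option Int :=
  some (match o with | none => g | some m => min m g)

-- gaps produced while scanning an index list with an optional previous index
def chainG : Option Int → List Int → List Int
  | _, [] => []
  | none, p :: ps => chainG (some p) ps
  | some q, p :: ps => (p - q - 1) :: chainG (some p) ps

-- last element of ps, defaulting to o
def lastD : Option Int → List Int → Option Int
  | o, [] => o
  | _, p :: ps => lastD (some p) ps

-- all self-distance gaps of activity a over the whole log
def gapsB (cl : List (List String)) (a : String) : List Int :=
  cl.flatMap (fun t => zipDiffs (occ a 0 t))

lemma occ_nil (a : String) (s : Int) : occ a s [] = [] := by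
  simp [occ, PySem.List.enumerate]

lemma occ_cons (a x : String) (s : Int) (u : List String) :
    occ a s (x :: u) = if x == a then s :: occ a (s+1) u else occ a (s+1) u := by
  simp only [occ, PySem.List.enumerate_cons, List.filterMap_cons]
  split <;> simp_all

lemma length_filter_eq_length_occ (a : String) :
    ∀ (u : List String) (s : Int), (u.filter (fun e => e == a)).length = (occ a s u).length := by
  intro u
  induction u with
  | nil => intro s; simp [occ_nil]
  | cons x u ih =>
    intro s
    rw [occ_cons]
    by_cases h : x == a <;> simp [h, ih (s+1)]

lemma zipDiffs_nil_of_short (l : List Int) (h : l.length ≤ 1) : zipDiffs l = [] := by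
  match l with
  | [] => rfl
  | [x] => rfl
  | x :: y :: r => simp at h

lemma zipDiffs_ne_nil (l : List Int) (h : 1 < l.length) : zipDiffs l ≠ [] := by
  match l with
  | [] => simp at h
  | [x] => simp at h
  | x :: y :: r => simp [zipDiffs]

lemma chainG_some (q : Int) (ps : List Int) : chainG (some q) ps = zipDiffs (q :: ps) := by
  induction ps generalizing q with
  | nil => rfl
  | cons p ps ih => simp [chainG, zipDiffs, ih]

lemma chainG_none (ps : List Int) : chainG none ps = zipDiffs ps := by
  cases ps with
  | nil => rfl
  | cons p ps => simp [chainG, chainG_some]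

lemma foldl_upd_some (t : List Int) : ∀ (x : Int), t.foldl upd (some x) = some (t.foldl min x) := by
  induction t with
  | nil => intro x; rfl
  | cons g t ih => intro x; simp [upd, ih]

lemma min?_eq_foldl_upd (gs : List Int) :
    PySem.List.min? gs (fun x => x) = gs.foldl upd none := by
  cases gs with
  | nil => rfl
  | cons x t => rw [PySem.List.min?_id_cons]; simp [upd, foldl_upd_some]

lemma foldl_upd_ne_none (gs : List Int) (h : gs ≠ []) : gs.foldl upd none ≠ none := by
  cases gs with
  | nil => simp at h
  | cons g t => simp [upd, foldl_upd_some]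

-- A's gap expression over an index list equals zipDiffs
lemma dmap_eq (x : Int) (r : List Int) :
    (List.range r.length).map (fun k => r.getD k 0 - (x :: r).getD k 0 - 1) = zipDiffs (x :: r) := by
  induction r generalizing x with
  | nil => rfl
  | cons y r ih =>
    rw [List.length_cons, List.range_succ_eq_map, List.map_cons, List.map_map]
    show _ = (y - x - 1) :: zipDiffs (y :: r)
    simp only [List.getD_cons_zero, List.getD_cons_succ, Function.comp_def]
    exact congrArg _ (ih y)

lemma filterMap_somes {α β : Type} (g : α → Option β) (f : α → β) (l : List α)
    (h : ∀ a ∈ l, g a = some (f a)) : l.filterMap g = l.map f := by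
  induction l with
  | nil => rfl
  | cons x t ih =>
    rw [List.filterMap_cons, h x (by simp), List.map_cons,
      ih (fun a ha => h a (by simp [ha]))]

lemma gapsA_eq (l : List Int) :
    (PySem.List.enumerate l).filterMap
      (fun p => if p.1 > 0 then
          some (PySem.List.pyGetD l p.1 0 - PySem.List.pyGetD l (p.1 - 1) 0 - 1)
        else none) = zipDiffs l := by
  rw [PySem.List.enumerate_eq_map_pyRange l 0, List.filterMap_map,
    PySem.List.pyRange_one, List.filterMap_map]
  cases l with
  | nil => rfl
  | cons x r =>
    simp only [PySem.List.len, List.length_cons, Function.comp_def]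
    rw [show ((((r.length + 1 : Nat) : Int)) - 0).toNat = r.length + 1 by omega]
    rw [List.range_succ_eq_map, List.filterMap_cons]
    have h0 : ¬ ((0 : Int) + ((0 : Nat) : Int) > 0) := by simp
    rw [if_neg h0, List.filterMap_map]
    rw [filterMap_somes _
      (fun k => (x :: r).getD (k + 1) 0 - (x :: r).getD k 0 - 1) _ ?_]
    · have := dmap_eq x r
      simp only [List.getD_cons_succ] at this ⊢
      exact this
    · intro k _
      simp only [Function.comp_apply]
      have h1 : (0 : Int) + ((Nat.succ k : Nat) : Int) > 0 := by push_cast; omega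
      rw [if_pos h1]
      congr 1
      rw [show (0 : Int) + ((Nat.succ k : Nat) : Int) = ((k + 1 : Nat) : Int) by push_cast; ring]
      rw [show ((k + 1 : Nat) : Int) - 1 = ((k : Nat) : Int) by push_cast; ring]
      rw [PySem.List.pyGetD_of_nonneg _ _ (by positivity),
        PySem.List.pyGetD_of_nonneg _ _ (by positivity)]
      simp

-- items of A's fold: fresh keys append in order
lemma astep_items_self (cl : List (List String)) (a : String)
    (m : PySem.Dict String Int) (h : m.contains a = false) :
    (astep cl m a).items = m.items ++ (match (astep cl PySem.Dict.empty a).get? a with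
      | some v => [(a, v)] | none => []) := by
  by_cases hcond : ((cl.map (fun t => t.filter (fun e => e == a))).filter
      (fun t => decide (t.length > 1))).length > 0
  · simp only [astep, if_pos hcond]
    rw [PySem.Dict.items_insert_of_not_contains m _ h, PySem.Dict.get?_insert_self]
  · simp only [astep, if_neg hcond]
    rw [show (PySem.Dict.empty : PySem.Dict String Int).get? a = none from rfl]
    simp

lemma astep_contains_ne (cl : List (List String)) {a b : String} (hba : b ≠ a)
    (m : PySem.Dict String Int) : (astep cl m a).contains b = m.contains b := by
  by_cases hcond : ((cl.map (fun t => t.filter (fun e => e == a))).filter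
      (fun t => decide (t.length > 1))).length > 0
  · simp only [astep, if_pos hcond]
    rw [PySem.Dict.contains_insert]
    simp [hba]
  · simp only [astep, if_neg hcond]

lemma foldl_astep_items (cl : List (List String)) :
    ∀ (l : List String) (m : PySem.Dict String Int), l.Nodup →
      (∀ a ∈ l, m.contains a = false) →
      (l.foldl (astep cl) m).items
        = m.items ++ l.filterMap
            (fun a => ((astep cl PySem.Dict.empty a).get? a).map (fun v => (a, v))) := by
  intro l
  induction l with
  | nil => intro m _ _; simp
  | cons a l ih =>
    intro m hnd hc
    have hna : a ∉ l := (List.nodup_cons.mp hnd).1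
    have hnd' := (List.nodup_cons.mp hnd).2
    rw [List.foldl_cons, List.filterMap_cons]
    rw [ih _ hnd' (fun b hb => by
      have hba : b ≠ a := fun h => hna (h ▸ hb)
      rw [astep_contains_ne cl hba m]
      exact hc b (by simp [hb]))]
    rw [astep_items_self cl a m (hc a (by simp)), List.append_assoc]
    cases (astep cl PySem.Dict.empty a).get? a <;> rfl

-- inner loop invariant of B
lemma innerInv (a : String) :
    ∀ (u : List String) (s : Int) (mins last : PySem.Dict String Int),
      (((PySem.List.enumerate u s).foldl bstep (mins, last)).1.get? a
          = (chainG (last.get? a) (occ a s u)).foldl upd (mins.get? a))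
      ∧ (((PySem.List.enumerate u s).foldl bstep (mins, last)).2.get? a
          = lastD (last.get? a) (occ a s u)) := by
  intro u
  induction u with
  | nil =>
    intro s mins last
    rw [PySem.List.enumerate_nil]
    exact ⟨by simp [occ_nil, chainG], by simp [occ_nil, lastD]⟩
  | cons x u ih =>
    intro s mins last
    rw [PySem.List.enumerate_cons, List.foldl_cons]
    rw [show bstep (mins, last) (s, x)
        = (if last.contains x then
             (if !(mins.contains x) || (s - last.getD x 0 - 1) < mins.getD x 0 then
                mins.insert x (s - last.getD x 0 - 1) else mins)
           else mins, last.insert x s) from rfl]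
    obtain ⟨IH1, IH2⟩ := ih (s+1) _ _
    rw [IH1, IH2]
    by_cases hx : x = a
    · subst hx
      have ho : occ x s (x :: u) = s :: occ x (s + 1) u := by
        rw [occ_cons, if_pos (by simp)]
      rw [ho, PySem.Dict.get?_insert_self]
      refine ⟨?_, by simp [lastD]⟩
      cases hl : last.get? x with
      | none =>
        have hlc : last.contains x = false := by
          rw [PySem.Dict.contains_eq_isSome_get?, hl]; rfl
        rw [hlc, if_neg (by simp)]
        simp [chainG]
      | some q =>
        have hlc : last.contains x = true := by
          rw [PySem.Dict.contains_eq_isSome_get?, hl]; rfl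
        have hgd : last.getD x 0 = q := by simp [PySem.Dict.getD, hl]
        rw [hlc, if_pos rfl, hgd]
        rw [show chainG (some q) (s :: occ x (s + 1) u)
            = (s - q - 1) :: chainG (some s) (occ x (s + 1) u) from rfl, List.foldl_cons]
        congr 1
        cases hm : mins.get? x with
        | none =>
          have hmc : mins.contains x = false := by
            rw [PySem.Dict.contains_eq_isSome_get?, hm]; rfl
          rw [hmc, if_pos (by simp), PySem.Dict.get?_insert_self]
          simp [upd]
        | some m =>
          have hmc : mins.contains x = true := by
            rw [PySem.Dict.contains_eq_isSome_get?, hm]; rfl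
          have hmd : mins.getD x 0 = m := by simp [PySem.Dict.getD, hm]
          rw [hmc, hmd]
          by_cases hg : s - q - 1 < m
          · rw [if_pos (by simp [hg]), PySem.Dict.get?_insert_self]
            simp [upd, min_eq_right hg.le]
          · rw [if_neg (by simp [hg]), hm]
            simp [upd, min_eq_left (by omega : m ≤ s - q - 1)]
    · have hax : a ≠ x := fun h => hx h.symm
      have ho : occ a s (x :: u) = occ a (s + 1) u := by
        rw [occ_cons, if_neg (by simp [hx])]
      rw [ho, PySem.Dict.get?_insert_of_ne _ _ hax]
      refine ⟨?_, rfl⟩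
      congr 1
      split_ifs with h1 h2
      · rw [PySem.Dict.get?_insert_of_ne _ _ hax]
      · rfl
      · rfl

-- outer loop of B accumulates the running minimum over all gaps
lemma outerInv (a : String) :
    ∀ (cl : List (List String)) (mins : PySem.Dict String Int),
      (cl.foldl bouter mins).get? a
        = (cl.flatMap (fun t => zipDiffs (occ a 0 t))).foldl upd (mins.get? a) := by
  intro cl
  induction cl with
  | nil => intro mins; rfl
  | cons t cl ih =>
    intro mins
    rw [List.foldl_cons, List.flatMap_cons, List.foldl_append, ih]
    congr 1
    show (((PySem.List.enumerate t).foldl bstep (mins, PySem.Dict.empty)).1).get? a = _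
    rw [(innerInv a t 0 mins PySem.Dict.empty).1,
      show (PySem.Dict.empty : PySem.Dict String Int).get? a = none from rfl, chainG_none]

lemma flatMap_filter_zip (L : List (List Int)) :
    ((L.filter (fun l => decide (l.length > 1))).map zipDiffs).flatMap (fun l => l)
      = L.flatMap (fun l => zipDiffs l) := by
  induction L with
  | nil => rfl
  | cons l L ih =>
    by_cases h : l.length > 1
    · rw [List.filter_cons_of_pos (by simpa using h), List.map_cons, List.flatMap_cons,
        List.flatMap_cons, ih]
    · rw [List.filter_cons_of_neg (by simpa using h), List.flatMap_cons, ih,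
        zipDiffs_nil_of_short l (by omega), List.nil_append]

-- the per-activity value A stores equals B's running minimum
lemma astep_get_eq (cl : List (List String)) (a : String) :
    (astep cl PySem.Dict.empty a).get? a = (gapsB cl a).foldl upd none := by
  by_cases hcond : ((cl.map (fun t => t.filter (fun e => e == a))).filter
      (fun t => decide (t.length > 1))).length > 0
  · simp only [astep, if_pos hcond]
    rw [PySem.Dict.get?_insert_self]
    rw [List.map_congr_left (fun l _ => gapsA_eq l), flatMap_filter_zip, List.flatMap_map]
    rw [show (cl.flatMap fun t => zipDiffs ((PySem.List.enumerate t).filterMap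
        (fun p => if p.2 == a then some p.1 else none))) = gapsB cl a from rfl]
    rw [min?_eq_foldl_upd]
    have hne : gapsB cl a ≠ [] := by
      intro hnil
      obtain ⟨y, hy⟩ := List.exists_mem_of_length_pos hcond
      rw [List.mem_filter] at hy
      obtain ⟨t, ht, rfl⟩ := List.mem_map.mp hy.1
      have h2 : 1 < (occ a 0 t).length := by
        rw [← length_filter_eq_length_occ]
        simpa using hy.2
      exact zipDiffs_ne_nil _ h2 (List.flatMap_eq_nil_iff.mp hnil _ ht)
    cases hres : (gapsB cl a).foldl upd none with
    | none => exact absurd hres (foldl_upd_ne_none _ hne)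
    | some m => rfl
  · simp only [astep, if_neg hcond]
    rw [show (PySem.Dict.empty : PySem.Dict String Int).get? a = none from rfl]
    have hnil : (cl.map (fun t => t.filter (fun e => e == a))).filter
        (fun t => decide (t.length > 1)) = [] :=
      List.length_eq_zero_iff.mp (by omega)
    have hz : gapsB cl a = [] := by
      rw [gapsB, List.flatMap_eq_nil_iff]
      intro t ht
      apply zipDiffs_nil_of_short
      rw [← length_filter_eq_length_occ a t 0]
      have := List.filter_eq_nil_iff.mp hnil _ (List.mem_map.mpr ⟨t, ht, rfl⟩)
      simpa using this
    rw [hz]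
    rfl

-- ===== VERDICT (by name: the statement is the Claim_ definition above) =====
theorem msd_spec : Claim_equal_msd := by
  intro cl _
  unfold Spec_msd msd msd_alt get_alphabet
  rw [foldl_astep_items cl _ PySem.Dict.empty (PySem.Set.nodup_ofList _)
        (by intro a _; rfl)]
  rw [PySem.List.dedup_eq_ofList]
  rw [show (PySem.Dict.empty : PySem.Dict String Int).items = [] from rfl, List.nil_append]
  apply List.filterMap_congr
  intro a _
  rw [astep_get_eq, outerInv]
  rfl
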